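-- pv_equiv track=rewrite | github.com/scieloorg/core | core/utils/standardizer.py | standardize_code_and_name
-- ===== SOURCE A (Python) =====
-- def get_separators(text, exclusion_list=None):
--     exclusion_list = exclusion_list or '.-!@#$%&"' + "'"
--     separators = []
--     for c in text:
--         if c.isalnum() or c in exclusion_list:
--             continue
--         if c.strip():
--             separators.append(c)
--     return separators
--
-- def get_splitted_text(text):
--     text = text and text.strip()
--     if not text:
--         return []
--
--     text_ = text.replace(" - ", "/").replace("- ", "/").replace(" -", "/")
--     text_ = text_.replace(". ", "/")
--
--     separators = get_separators(text_)
--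
--     # padroniza a quantidade de espaços
--     text_ = " ".join([item.strip() for item in text_.split() if item.strip()])
--     for sep in separators:
--         text_ = text_.replace(sep, "#####")
--
--     return [item.strip() for item in text_.split("#####") if item.strip()]
--
-- def standardize_code_and_name(original):
--     """
--     Dado o texto original, identifica pares de code e nome.
--     Os separadores podem separar code e nome e/ou itens de lista.
--     Ex.: USP / Unicamp
--     São Paulo/SP, Rio de Janeiro/RJ
--     """
--     splitted_text = get_splitted_text(original)
--     codes = []
--     names = []
--     for value in splitted_text:
--         if value.upper() == value and len(value) == 2:
--             # codes em maíscula
--             codes.append(value)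
--         else:
--             names.append(value)
--     if len(names) == len(codes):
--         for acron, name in zip(codes, names):
--             yield {"code": acron, "name": name}
--     elif len(names) == 0:
--         for acron in codes:
--             yield {"code": acron}
--     elif len(codes) == 0:
--         for name in names:
--             yield {"name": name}
--     else:
--         # como o texto está bem fora do padrão,
--         # pode-se evidenciar retornando o original
--         yield {"name": original}
-- ===== SOURCE B (Python) =====
-- # B: same observable behaviour, but the separator handling is one per-character
-- # expansion pass (no separator collection, no per-separator replace loop), the
-- # replacement patterns are driven by a data table, token cleanup is a single
-- # conditional-append loop and the final dispatch is a reordered decision tree.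
-- _EXCLUSION = '.-!@#$%&"' + "'"
-- _REPLACEMENTS = ((" - ", "/"), ("- ", "/"), (" -", "/"), (". ", "/"))
--
--
-- def _is_sep(c):
--     return not (c.isalnum() or c in _EXCLUSION or c.isspace())
--
--
-- def _tokens(original):
--     text = original.strip() if original else original
--     if not text:
--         return []
--     for pat, repl in _REPLACEMENTS:
--         text = text.replace(pat, repl)
--     text = " ".join(text.split())
--     expanded = "".join("#####" if _is_sep(c) else c for c in text)
--     out = []
--     for part in expanded.split("#####"):
--         part = part.strip()
--         if part:
--             out.append(part)
--     return out
--
--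
-- def standardize_code_and_name(original):
--     tokens = _tokens(original)
--     codes = [v for v in tokens if v.upper() == v and len(v) == 2]
--     names = [v for v in tokens if not (v.upper() == v and len(v) == 2)]
--     if not names:
--         for code in codes:
--             yield {"code": code}
--     elif not codes:
--         for name in names:
--             yield {"name": name}
--     elif len(codes) == len(names):
--         for code, name in zip(codes, names):
--             yield {"code": code, "name": name}
--     else:
--         yield {"name": original}
-- ===== Notes on version B (the rewrite author's own statement) =====
-- stated objective: alternative
-- what changed: A collects the separator characters and then runs one full-string replace pass per collected separator before splitting on the sentinel, classifies tokens with an accumulator loop and dispatches the equal-lengths case first; B expands each character through a single predicate pass (no separator list, no repeated replace passes), drives the pattern replacements from a data table, classifies with two filters and dispatches through a reordered decision tree (empty cases first).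
import Mathlib
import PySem

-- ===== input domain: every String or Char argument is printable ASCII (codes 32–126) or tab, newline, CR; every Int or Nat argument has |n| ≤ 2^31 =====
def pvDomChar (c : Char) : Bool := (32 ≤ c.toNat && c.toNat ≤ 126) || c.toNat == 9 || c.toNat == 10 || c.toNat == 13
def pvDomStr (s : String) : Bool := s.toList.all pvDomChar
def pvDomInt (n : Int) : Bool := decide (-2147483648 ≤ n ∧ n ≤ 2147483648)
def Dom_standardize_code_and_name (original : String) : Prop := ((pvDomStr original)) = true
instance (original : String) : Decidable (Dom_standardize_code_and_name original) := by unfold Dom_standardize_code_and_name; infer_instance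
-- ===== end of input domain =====

-- B replaces A's scan-for-separators plus one full-string replace pass per separator occurrence
-- with a single per-character expansion pass, drives the pattern replacements from a data table,
-- classifies tokens with two filters and dispatches through a reordered decision tree; same
-- return value everywhere (objective: alternative).

-- ===== PORT A =====
-- exclusion_list = '.-!@#$%&"' + "'"
def pvExclA : List Char := (".-!@#$%&\"'").toList

def get_separators (text : List Char) : List Char :=
  text.foldl
    (fun separators c =>
      if PySem.Chars.isalnum c || PySem.Chars.isIn [c] pvExclA then separators
      else if !(PySem.Chars.strip [c]).isEmpty then separators ++ [c]
      else separators)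
    []

def get_splitted_text (text : List Char) : List (List Char) :=
  let text := if text.isEmpty then text else PySem.Chars.strip text
  if text.isEmpty then []
  else
    let t1 := PySem.Chars.replace (PySem.Chars.replace (PySem.Chars.replace text (" - ".toList) ("/".toList)) ("- ".toList) ("/".toList)) (" -".toList) ("/".toList)
    let t2 := PySem.Chars.replace t1 (". ".toList) ("/".toList)
    let separators := get_separators t2
    let t3 := PySem.Chars.join (" ".toList)
      (((PySem.Chars.split₀ t2).filter (fun i => !(PySem.Chars.strip i).isEmpty)).map PySem.Chars.strip)
    let t4 := separators.foldl (fun t sep => PySem.Chars.replace t [sep] ("#####".toList)) t3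
    ((PySem.Chars.splitOn t4 ("#####".toList)).filter (fun i => !(PySem.Chars.strip i).isEmpty)).map PySem.Chars.strip

def standardize_code_and_name (original : String) : List (List (String × String)) :=
  let splitted := get_splitted_text original.toList
  let cn := splitted.foldl
    (fun (p : List (List Char) × List (List Char)) v =>
      if PySem.Chars.upper v == v && v.length == 2 then (p.1 ++ [v], p.2) else (p.1, p.2 ++ [v]))
    ([], [])
  if cn.2.length = cn.1.length then
    (cn.1.zip cn.2).map (fun p => [("code", String.ofList p.1), ("name", String.ofList p.2)])
  else if cn.2.length = 0 then cn.1.map (fun a => [("code", String.ofList a)])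
  else if cn.1.length = 0 then cn.2.map (fun n => [("name", String.ofList n)])
  else [[("name", original)]]

-- ===== PORT B =====
def pvExclB : List Char := (".-!@#$%&\"'").toList

-- _REPLACEMENTS table of Source B
def pvReplPairs : List (List Char × List Char) :=
  [(" - ".toList, "/".toList), ("- ".toList, "/".toList),
   (" -".toList, "/".toList), (". ".toList, "/".toList)]

def pvIsSep (c : Char) : Bool :=
  !(PySem.Chars.isalnum c || PySem.Chars.isIn [c] pvExclB || PySem.Chars.isspace c)

-- _tokens(original) of Source B
def pv_tokens (original : String) : List (List Char) :=
  let text := if original.toList.isEmpty then original.toList else PySem.Chars.strip original.toList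
  if text.isEmpty then []
  else
    let t := pvReplPairs.foldl (fun t pr => PySem.Chars.replace t pr.1 pr.2) text
    let t := PySem.Chars.join (" ".toList) (PySem.Chars.split₀ t)
    let expanded := t.flatMap (fun c => if pvIsSep c then "#####".toList else [c])
    (PySem.Chars.splitOn expanded ("#####".toList)).filterMap
      (fun part => let p := PySem.Chars.strip part; if p.isEmpty then none else some p)

def pvIsCode (v : List Char) : Bool := PySem.Chars.upper v == v && v.length == 2

def standardize_code_and_name_alt (original : String) : List (List (String × String)) :=
  let tokens := pv_tokens original
  let codes := tokens.filter pvIsCode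
  let names := tokens.filter (fun v => !pvIsCode v)
  if names.isEmpty then codes.map (fun a => [("code", String.ofList a)])
  else if codes.isEmpty then names.map (fun n => [("name", String.ofList n)])
  else if codes.length = names.length then
    (codes.zip names).map (fun p => [("code", String.ofList p.1), ("name", String.ofList p.2)])
  else [[("name", original)]]

-- ===== PRECONDITION & SPEC =====
def Spec_standardize_code_and_name (original : String) (out : List (List (String × String))) : Prop := out = standardize_code_and_name_alt original
instance (original : String) (out : List (List (String × String))) : Decidable (Spec_standardize_code_and_name original out) := by unfold Spec_standardize_code_and_name; infer_instance

-- ===== CLAIM (what is proved, stated in full; the proofs are below) =====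
def Claim_equal_standardize_code_and_name : Prop := ∀ (original : String), Dom_standardize_code_and_name original → Spec_standardize_code_and_name original (standardize_code_and_name original)

-- ===== LEMMAS AND PROOFS =====

-- c.strip() for a single character: empty iff the character is whitespace
lemma strip_singleton (c : Char) :
    PySem.Chars.strip [c] = if PySem.Chars.isspace c then [] else [c] := by
  by_cases h : PySem.Chars.isspace c = true <;>
    simp [PySem.Chars.strip, PySem.Chars.lstrip, PySem.Chars.rstrip, List.dropWhile, h]

-- A's separator predicate coincides with B's per-character predicate
lemma sep_pred_eq (c : Char) :
    (!(PySem.Chars.isalnum c || PySem.Chars.isIn [c] pvExclA) && !(PySem.Chars.strip [c]).isEmpty)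
      = pvIsSep c := by
  by_cases hs : PySem.Chars.isspace c = true <;>
    by_cases ha : (PySem.Chars.isalnum c || PySem.Chars.isIn [c] pvExclA) = true <;>
      simp [pvIsSep, pvExclB, strip_singleton, hs, pvExclA] at *

-- A's separator scan is a filter by pvIsSep
lemma get_separators_eq_filter (text : List Char) :
    get_separators text = text.filter pvIsSep := by
  unfold get_separators
  have hstep : (fun (separators : List Char) (c : Char) =>
      if PySem.Chars.isalnum c || PySem.Chars.isIn [c] pvExclA then separators
      else if !(PySem.Chars.strip [c]).isEmpty then separators ++ [c]
      else separators)
      = fun separators c => if pvIsSep c then separators ++ [c] else separators := by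
    funext separators c
    rw [← sep_pred_eq c]
    by_cases ha : (PySem.Chars.isalnum c || PySem.Chars.isIn [c] pvExclA) = true <;>
      by_cases hb : (!(PySem.Chars.strip [c]).isEmpty) = true <;> simp [ha, hb]
  rw [hstep]
  have := PySem.List.foldl_append_if pvIsSep (id : Char → Char) text []
  simpa using this

-- every piece of str.split() is nonempty and consists of non-space characters of the input
lemma split0_go_spec (Q : Char → Prop) :
    ∀ (cs cur : List Char) (acc : List (List Char)),
      (∀ c ∈ cs, Q c) →
      (∀ c ∈ cur, Q c ∧ PySem.Chars.isspace c = false) →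
      (∀ p ∈ acc, p ≠ [] ∧ ∀ c ∈ p, Q c ∧ PySem.Chars.isspace c = false) →
      ∀ p ∈ PySem.Chars.split₀.go cs cur acc,
        p ≠ [] ∧ ∀ c ∈ p, Q c ∧ PySem.Chars.isspace c = false := by
  intro cs
  induction cs with
  | nil =>
    intro cur acc _ hcur hacc p hp
    by_cases hc : cur.isEmpty = true
    · rw [show PySem.Chars.split₀.go [] cur acc = acc.reverse from by
        simp [PySem.Chars.split₀.go, hc]] at hp
      exact hacc p (List.mem_reverse.mp hp)
    · rw [show PySem.Chars.split₀.go [] cur acc = (cur.reverse :: acc).reverse from by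
        simp [PySem.Chars.split₀.go, hc]] at hp
      rcases List.mem_cons.mp (List.mem_reverse.mp hp) with h | h
      · subst h
        refine ⟨by simpa using hc, fun c hc' => hcur c (List.mem_reverse.mp hc')⟩
      · exact hacc p h
  | cons c rest ih =>
    intro cur acc hcs hcur hacc p hp
    by_cases hs : PySem.Chars.isspace c = true
    · by_cases hc : cur.isEmpty = true
      · rw [show PySem.Chars.split₀.go (c :: rest) cur acc = PySem.Chars.split₀.go rest [] acc from by
          simp [PySem.Chars.split₀.go, hs, hc]] at hp
        exact ih [] acc (fun x hx => hcs x (List.mem_cons_of_mem _ hx)) (by simp) hacc p hp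
      · rw [show PySem.Chars.split₀.go (c :: rest) cur acc
            = PySem.Chars.split₀.go rest [] (cur.reverse :: acc) from by
          simp [PySem.Chars.split₀.go, hs, hc]] at hp
        refine ih [] (cur.reverse :: acc) (fun x hx => hcs x (List.mem_cons_of_mem _ hx)) (by simp) ?_ p hp
        intro q hq
        rcases List.mem_cons.mp hq with hq | hq
        · subst hq
          refine ⟨by simpa using hc, fun x hx => hcur x (List.mem_reverse.mp hx)⟩
        · exact hacc q hq
    · rw [show PySem.Chars.split₀.go (c :: rest) cur acc = PySem.Chars.split₀.go rest (c :: cur) acc from by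
        simp [PySem.Chars.split₀.go, hs]] at hp
      refine ih (c :: cur) acc (fun x hx => hcs x (List.mem_cons_of_mem _ hx)) ?_ hacc p hp
      intro x hx
      rcases List.mem_cons.mp hx with hx | hx
      · rw [hx]
        exact ⟨hcs c List.mem_cons_self, by simpa using hs⟩
      · exact hcur x hx

lemma split0_spec (cs : List Char) :
    ∀ p ∈ PySem.Chars.split₀ cs, p ≠ [] ∧ ∀ c ∈ p, c ∈ cs ∧ PySem.Chars.isspace c = false := by
  intro p hp
  exact split0_go_spec (fun c => c ∈ cs) cs [] [] (fun _ h => h) (by simp) (by simp) p hp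

-- strip is the identity on a list without whitespace characters
lemma strip_of_no_space (p : List Char) (h : ∀ c ∈ p, PySem.Chars.isspace c = false) :
    PySem.Chars.strip p = p := by
  have hl : PySem.Chars.lstrip p = p := by
    unfold PySem.Chars.lstrip
    rw [List.dropWhile_eq_self_iff]
    intro hl
    simpa using h p[0] (List.getElem_mem hl)
  unfold PySem.Chars.strip
  rw [hl]
  unfold PySem.Chars.rstrip
  rw [List.dropWhile_eq_self_iff.mpr, List.reverse_reverse]
  intro hl'
  have hmem : p.reverse[0] ∈ p := by
    exact List.mem_reverse.mp (List.getElem_mem hl')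
  simpa using h _ hmem

-- membership in " ".join(parts)
lemma mem_join_space (parts : List (List Char)) (c : Char)
    (h : c ∈ PySem.Chars.join (" ".toList) parts) : c = ' ' ∨ ∃ p ∈ parts, c ∈ p := by
  induction parts with
  | nil => simp [PySem.Chars.join, List.intercalate] at h
  | cons p rest ih =>
    cases rest with
    | nil =>
      simp [PySem.Chars.join, List.intercalate] at h
      exact Or.inr ⟨p, by simp, h⟩
    | cons q rest' =>
      have hsplit : PySem.Chars.join (" ".toList) (p :: q :: rest')
          = p ++ " ".toList ++ PySem.Chars.join (" ".toList) (q :: rest') := by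
        simp [PySem.Chars.join, List.intercalate, List.intersperse]
      rw [hsplit] at h
      rcases List.mem_append.mp h with h | h
      · rcases List.mem_append.mp h with h | h
        · exact Or.inr ⟨p, by simp, h⟩
        · left; simpa using h
      · rcases ih h with h | ⟨r, hr, hcr⟩
        · exact Or.inl h
        · exact Or.inr ⟨r, List.mem_cons_of_mem _ hr, hcr⟩

-- str.replace with a single-character pattern is a per-character expansion
lemma replace_go_single (a : Char) (new : List Char) :
    ∀ (cs : List Char) (fuel : Nat) (acc : List Char), cs.length ≤ fuel →
      PySem.Chars.replace.go [a] new fuel cs acc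
        = acc.reverse ++ cs.flatMap (fun c => if c = a then new else [c]) := by
  intro cs
  induction cs with
  | nil =>
    intro fuel acc _
    cases fuel <;> simp [PySem.Chars.replace.go]
  | cons c t ih =>
    intro fuel acc hle
    cases fuel with
    | zero => simp at hle
    | succ f =>
      have hle' : t.length ≤ f := by simpa using hle
      by_cases hca : c = a
      · subst hca
        have hpre : List.isPrefixOf [c] (c :: t) = true := by simp [List.isPrefixOf]
        simp only [PySem.Chars.replace.go, hpre, if_true, List.length_cons, List.drop_succ_cons, List.length_nil, List.drop_zero]
        rw [ih f (new.reverse ++ acc) hle']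
        simp
      · have hpre : List.isPrefixOf [a] (c :: t) = false := by
          simp [List.isPrefixOf]
          exact fun h => hca h.symm
        simp only [PySem.Chars.replace.go, hpre, Bool.false_eq_true, if_false]
        rw [ih f (c :: acc) hle']
        simp [hca]

lemma replace_single (cs : List Char) (a : Char) (new : List Char) :
    PySem.Chars.replace cs [a] new = cs.flatMap (fun c => if c = a then new else [c]) := by
  unfold PySem.Chars.replace
  simp [replace_go_single a new cs cs.length [] (le_refl _)]

-- replacing each character of L in turn (L free of '#') expands every occurrence of an L-character
lemma foldl_expand (L : List Char) (hL : ∀ x ∈ L, x ≠ '#') :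
    ∀ s : List Char,
      L.foldl (fun t sep => PySem.Chars.replace t [sep] ("#####".toList)) s
        = s.flatMap (fun c => if c ∈ L then "#####".toList else [c]) := by
  induction L with
  | nil => intro s; simp
  | cons a L ih =>
    intro s
    have hL' : ∀ x ∈ L, x ≠ '#' := fun x hx => hL x (List.mem_cons_of_mem _ hx)
    have hhash : '#' ∉ L := fun h => hL '#' (List.mem_cons_of_mem _ h) rfl
    rw [List.foldl_cons, replace_single, ih hL', List.flatMap_assoc]
    refine List.flatMap_congr ?_
    intro c _
    by_cases hca : c = a
    · subst hca
      simp [hhash]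
    · by_cases hcl : c ∈ L <;> simp [hca, hcl]

-- B's table-driven replacement loop is A's chain of four replaces
lemma repl_pairs_eq (text : List Char) :
    pvReplPairs.foldl (fun t pr => PySem.Chars.replace t pr.1 pr.2) text
      = PySem.Chars.replace (PySem.Chars.replace (PySem.Chars.replace (PySem.Chars.replace text (" - ".toList) ("/".toList)) ("- ".toList) ("/".toList)) (" -".toList) ("/".toList)) (". ".toList) ("/".toList) := by
  simp [pvReplPairs]

-- A's filter-then-strip comprehension is B's conditional-append loop (filterMap)
lemma filter_map_strip_eq_filterMap (l : List (List Char)) :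
    (l.filter (fun i => !(PySem.Chars.strip i).isEmpty)).map PySem.Chars.strip
      = l.filterMap (fun part => let p := PySem.Chars.strip part; if p.isEmpty then none else some p) := by
  induction l with
  | nil => simp
  | cons a l ih =>
    by_cases h : (PySem.Chars.strip a).isEmpty = true
    · have h' : PySem.Chars.strip a = [] := by simpa [List.isEmpty_iff] using h
      simp [h', ih]
    · have h' : ¬ PySem.Chars.strip a = [] := by simpa [List.isEmpty_iff] using h
      simp [h, h', ih]

-- classification by a fold over a pair of accumulators is a pair of filters
lemma fold_partition (p : List Char → Bool) :
    ∀ (l cs ns : List (List Char)),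
      l.foldl (fun (acc : List (List Char) × List (List Char)) v =>
          if p v then (acc.1 ++ [v], acc.2) else (acc.1, acc.2 ++ [v])) (cs, ns)
        = (cs ++ l.filter p, ns ++ l.filter (fun v => !(p v))) := by
  intro l
  induction l with
  | nil => intro cs ns; simp
  | cons v l ih =>
    intro cs ns
    by_cases hv : p v = true <;> simp [hv, ih]

-- the two sentinel-expansion pipelines agree for any intermediate text u (after the four replaces)
lemma core_expand_eq (u : List Char) :
    (get_separators u).foldl (fun t sep => PySem.Chars.replace t [sep] ("#####".toList))
      (PySem.Chars.join (" ".toList)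
        (((PySem.Chars.split₀ u).filter (fun i => !(PySem.Chars.strip i).isEmpty)).map PySem.Chars.strip))
    = (PySem.Chars.join (" ".toList) (PySem.Chars.split₀ u)).flatMap
        (fun c => if pvIsSep c then "#####".toList else [c]) := by
  have hpieces : ∀ p ∈ PySem.Chars.split₀ u, PySem.Chars.strip p = p ∧ p ≠ [] := by
    intro p hp
    obtain ⟨hne, hch⟩ := split0_spec u p hp
    exact ⟨strip_of_no_space p (fun c hc => (hch c hc).2), hne⟩
  have hfilter : (PySem.Chars.split₀ u).filter (fun i => !(PySem.Chars.strip i).isEmpty)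
      = PySem.Chars.split₀ u := by
    apply List.filter_eq_self.mpr
    intro p hp
    obtain ⟨hs, hne⟩ := hpieces p hp
    simp [hs, hne]
  have hmap : (PySem.Chars.split₀ u).map PySem.Chars.strip = PySem.Chars.split₀ u := by
    rw [List.map_congr_left (fun p hp => (hpieces p hp).1)]
    simp
  rw [hfilter, hmap, get_separators_eq_filter]
  have hnohash : ∀ x ∈ u.filter pvIsSep, x ≠ '#' := by
    intro x hx hxh
    subst hxh
    have h1 : pvIsSep '#' = false := by decide
    have h2 := (List.mem_filter.mp hx).2
    rw [h1] at h2
    exact Bool.false_ne_true h2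
  rw [foldl_expand (u.filter pvIsSep) hnohash]
  refine List.flatMap_congr ?_
  intro c hc
  rcases mem_join_space _ c hc with hc' | ⟨p, hp, hcp⟩
  · subst hc'
    have h2 : pvIsSep ' ' = false := by decide
    simp [List.mem_filter, h2]
  · obtain ⟨hcu, _⟩ := (split0_spec u p hp).2 c hcp
    by_cases hsep : pvIsSep c = true
    · have hm : c ∈ u.filter pvIsSep := List.mem_filter.mpr ⟨hcu, hsep⟩
      simp [hm, hsep]
    · have hm : c ∉ u.filter pvIsSep := fun h => hsep (List.mem_filter.mp h).2
      simp [hm, hsep]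

-- the splitted/tokens lists of the two ports coincide
lemma tokens_eq (original : String) :
    get_splitted_text original.toList = pv_tokens original := by
  unfold get_splitted_text pv_tokens
  simp only []
  by_cases h : (if original.toList.isEmpty then original.toList else PySem.Chars.strip original.toList).isEmpty = true
  · simp only [h, if_true]
  · simp only [h]
    rw [repl_pairs_eq, core_expand_eq, filter_map_strip_eq_filterMap]

-- A's dispatch (equal-lengths branch first) equals B's reordered decision tree (empty cases first)
lemma dispatch_eq (original : String) (codes names : List (List Char)) :
    (if names.length = codes.length then
        (codes.zip names).map (fun p => [("code", String.ofList p.1), ("name", String.ofList p.2)])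
      else if names.length = 0 then codes.map (fun a => [("code", String.ofList a)])
      else if codes.length = 0 then names.map (fun n => [("name", String.ofList n)])
      else [[("name", original)]])
    = (if names.isEmpty then codes.map (fun a => [("code", String.ofList a)])
      else if codes.isEmpty then names.map (fun n => [("name", String.ofList n)])
      else if codes.length = names.length then
        (codes.zip names).map (fun p => [("code", String.ofList p.1), ("name", String.ofList p.2)])
      else [[("name", original)]]) := by
  cases names with
  | nil =>
    cases codes with
    | nil => simp
    | cons c cs => simp
  | cons n ns =>
    cases codes with
    | nil => simp
    | cons c cs =>
      have e1 : ¬ ((n :: ns).isEmpty = true) := by simp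
      have e2 : ¬ ((c :: cs).isEmpty = true) := by simp
      by_cases h : (n :: ns).length = (c :: cs).length
      · rw [if_pos h, if_neg e1, if_neg e2, if_pos h.symm]
      · have h' : ¬ (c :: cs).length = (n :: ns).length := fun e => h e.symm
        have l1 : ¬ ((n :: ns).length = 0) := by simp
        have l2 : ¬ ((c :: cs).length = 0) := by simp
        rw [if_neg h, if_neg l1, if_neg l2, if_neg e1, if_neg e2, if_neg h']

theorem standardize_spec_aux (original : String) :
    standardize_code_and_name original = standardize_code_and_name_alt original := by
  unfold standardize_code_and_name standardize_code_and_name_alt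
  rw [tokens_eq original]
  simp only [pvIsCode, fold_partition, List.nil_append]
  exact dispatch_eq original _ _

-- ===== VERDICT (by name: the statement is the Claim_ definition above) =====
theorem standardize_code_and_name_spec : Claim_equal_standardize_code_and_name := by
  intro original _
  unfold Spec_standardize_code_and_name
  exact standardize_spec_aux original
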